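-- pv_equiv track=rewrite | github.com/Archie519/multi_agent_debate | nodes/memory_node.py | has_repeating_phrases
-- ===== SOURCE A (Python) =====
-- def has_repeating_phrases(text, min_len=3, max_len=8):
--     """
--     Detect repeating n-grams that might indicate a looped or degenerate response.
--     """
--     tokens = text.lower().split()
--     for size in range(min_len, max_len + 1):
--         for i in range(len(tokens) - size):
--             phrase = " ".join(tokens[i:i + size])
--             rest = " ".join(tokens[i + size:])
--             if phrase in rest:
--                 return True
--     return False
-- ===== SOURCE B (Python) =====
-- def has_repeating_phrases(text, min_len=3, max_len=8):
--     # If a window of any size in [min_len, max_len] reoccurs later, then its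
--     # min_len-token prefix (a prefix substring of the window) reoccurs inside
--     # the even larger remainder, so it suffices to test size = min_len alone.
--     if min_len > max_len:
--         return False
--     tokens = text.lower().split()
--     n = len(tokens)
--     size = min_len
--     if n - size <= 0:
--         return False
--     # scan windows right-to-left, growing the remainder string incrementally
--     rest = tokens[n - 1]
--     for i in range(n - size - 1, -1, -1):
--         if " ".join(tokens[i:i + size]) in rest:
--             return True
--         rest = tokens[i + size - 1] + " " + rest
--     return False
-- ===== Notes on version B (the rewrite author's own statement) =====
-- stated objective: faster
-- what changed: B proves that any repeating window of size in [min_len,max_len] implies a repeating window of size min_len (its prefix repeats inside the larger remainder), so it scans only size min_len, traversing windows right-to-left while building the remainder string incrementally instead of A's scan of every size with remainders re-joined from scratch.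
-- outside the precondition, e.g. on has_repeating_phrases('', -6, -6): A returns True, B raises IndexError
import Mathlib
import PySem

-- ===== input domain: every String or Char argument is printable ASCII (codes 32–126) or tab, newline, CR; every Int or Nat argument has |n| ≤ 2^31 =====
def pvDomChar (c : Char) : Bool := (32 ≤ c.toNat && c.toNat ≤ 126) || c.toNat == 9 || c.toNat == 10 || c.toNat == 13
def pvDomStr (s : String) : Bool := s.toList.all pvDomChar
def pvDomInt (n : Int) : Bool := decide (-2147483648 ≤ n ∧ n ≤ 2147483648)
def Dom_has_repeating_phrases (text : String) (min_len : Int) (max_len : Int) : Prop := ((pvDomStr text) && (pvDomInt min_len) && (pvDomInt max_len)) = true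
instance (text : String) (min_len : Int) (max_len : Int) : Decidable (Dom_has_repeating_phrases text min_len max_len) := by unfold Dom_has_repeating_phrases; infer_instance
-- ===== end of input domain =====

-- B tests only size = min_len (if any larger window repeats, its min_len-token prefix
-- repeats too) and scans windows right-to-left while growing the remainder string
-- incrementally, instead of A's scan of every size with re-joined remainders.

-- ===== PORT A =====
-- inner 'for i in range(len(tokens) - size)' with its early 'return True'; the Nat fuel
-- is the exact remaining iteration count (n - size - i).toNat, so the loop is unchanged
def hrpInnerA (tokens : List String) (size : Int) (n : Int) : Nat → Int → Bool
  | 0, _ => false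
  | fuel + 1, i =>
    if i < n - size then
      let phrase := PySem.Str.join " " (PySem.List.slice tokens (some i) (some (i + size)))
      let rest := PySem.Str.join " " (PySem.List.slice tokens (some (i + size)) none)
      if PySem.Str.isIn phrase rest then true else hrpInnerA tokens size n fuel (i + 1)
    else false

-- outer 'for size in range(min_len, max_len + 1)', fuel = remaining size count
def hrpOuterA (tokens : List String) (stop : Int) : Nat → Int → Bool
  | 0, _ => false
  | fuel + 1, size =>
    if size < stop then
      if hrpInnerA tokens size tokens.length ((tokens.length : Int) - size).toNat 0 then true
      else hrpOuterA tokens stop fuel (size + 1)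
    else false

def has_repeating_phrases (text : String) (min_len : Int) (max_len : Int) : Bool :=
  let tokens := PySem.Str.split₀ (PySem.Str.lower text)
  hrpOuterA tokens (max_len + 1) (max_len + 1 - min_len).toNat min_len

-- ===== PORT B =====
-- 'for i in range(n - size - 1, -1, -1)' carrying rest; fuel = n - size iterations
def hrpLoopB (tokens : List String) (size : Int) : Nat → Int → String → Bool
  | 0, _, _ => false
  | fuel + 1, i, rest =>
    if PySem.Str.isIn (PySem.Str.join " " (PySem.List.slice tokens (some i) (some (i + size)))) rest
    then true
    else hrpLoopB tokens size fuel (i - 1)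
      (PySem.List.pyGetD tokens (i + size - 1) "" ++ " " ++ rest)

def has_repeating_phrases_alt (text : String) (min_len : Int) (max_len : Int) : Bool :=
  if min_len > max_len then false
  else
    let tokens := PySem.Str.split₀ (PySem.Str.lower text)
    let n : Int := tokens.length
    if n - min_len ≤ 0 then false
    else hrpLoopB tokens min_len (n - min_len).toNat (n - min_len - 1)
      (PySem.List.pyGetD tokens (n - 1) "")

-- ===== PRECONDITION & SPEC =====
-- Pre_ excludes exactly the inputs where B raises: a negative min_len (≤ max_len) on
-- whitespace-only text, where A's empty slice makes the membership test fire vacuously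
-- (A returns True) while B's seeding of the remainder with the last token raises IndexError.
def Pre_has_repeating_phrases (text : String) (min_len : Int) (max_len : Int) : Prop :=
  0 ≤ min_len ∨ max_len < min_len ∨ PySem.Str.split₀ (PySem.Str.lower text) ≠ []
instance (text : String) (min_len : Int) (max_len : Int) : Decidable (Pre_has_repeating_phrases text min_len max_len) := by unfold Pre_has_repeating_phrases; infer_instance
def pvWitness_has_repeating_phrases : String × Int × Int := ("the cat sat the cat sat on", 1, 8)

def Spec_has_repeating_phrases (text : String) (min_len : Int) (max_len : Int) (out : Bool) : Prop := out = has_repeating_phrases_alt text min_len max_len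
instance (text : String) (min_len : Int) (max_len : Int) (out : Bool) : Decidable (Spec_has_repeating_phrases text min_len max_len out) := by unfold Spec_has_repeating_phrases; infer_instance

-- ===== CLAIM (what is proved, stated in full; the proofs are below) =====
def Claim_equal_has_repeating_phrases : Prop := ∀ (text : String) (min_len : Int) (max_len : Int), Dom_has_repeating_phrases text min_len max_len → Pre_has_repeating_phrases text min_len max_len → Spec_has_repeating_phrases text min_len max_len (has_repeating_phrases text min_len max_len)

-- ===== LEMMAS AND PROOFS =====

-- the shared window condition: 'join(tokens[i:i+s]) in join(tokens[i+s:])'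
def pvCond (ts : List String) (s i : Int) : Bool :=
  PySem.Str.isIn (PySem.Str.join " " (PySem.List.slice ts (some i) (some (i + s))))
                 (PySem.Str.join " " (PySem.List.slice ts (some (i + s)) none))

theorem pvInnerA_iff (ts : List String) (s : Int) (fuel : Nat) :
    ∀ i : Int, (ts.length : Int) - s - i ≤ fuel →
    (hrpInnerA ts s ts.length fuel i = true ↔
      ∃ j : Int, i ≤ j ∧ j < (ts.length : Int) - s ∧ pvCond ts s j = true) := by
  induction fuel with
  | zero =>
    intro i hb
    simp only [hrpInnerA]
    constructor
    · intro h; exact absurd h (by simp)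
    · rintro ⟨j, h1, h2, _⟩; exfalso; omega
  | succ f ih =>
    intro i hb
    rw [hrpInnerA]
    by_cases hlt : i < (ts.length : Int) - s
    · rw [if_pos hlt]
      show (if pvCond ts s i = true then true else hrpInnerA ts s ts.length f (i+1)) = true ↔ _
      by_cases hc : pvCond ts s i = true
      · rw [if_pos hc]
        exact ⟨fun _ => ⟨i, le_refl i, hlt, hc⟩, fun _ => rfl⟩
      · rw [if_neg hc, ih (i+1) (by omega)]
        constructor
        · rintro ⟨j, h1, h2, h3⟩; exact ⟨j, by omega, h2, h3⟩
        · rintro ⟨j, h1, h2, h3⟩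
          refine ⟨j, ?_, h2, h3⟩
          rcases eq_or_lt_of_le h1 with heq | hlt2
          · exact absurd (heq ▸ h3) hc
          · omega
    · rw [if_neg hlt]
      constructor
      · intro h; exact absurd h (by simp)
      · rintro ⟨j, h1, h2, _⟩; exfalso; omega

theorem pvOuterA_iff (ts : List String) (stop : Int) (fuel : Nat) :
    ∀ sz : Int, stop - sz ≤ fuel →
    (hrpOuterA ts stop fuel sz = true ↔
      ∃ s : Int, sz ≤ s ∧ s < stop ∧
        ∃ j : Int, 0 ≤ j ∧ j < (ts.length : Int) - s ∧ pvCond ts s j = true) := by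
  induction fuel with
  | zero =>
    intro sz hb
    simp only [hrpOuterA]
    constructor
    · intro h; exact absurd h (by simp)
    · rintro ⟨s, h1, h2, _⟩; exfalso; omega
  | succ f ih =>
    intro sz hb
    rw [hrpOuterA]
    by_cases hlt : sz < stop
    · rw [if_pos hlt]
      have hinner := pvInnerA_iff ts sz (((ts.length : Int) - sz).toNat) 0 (by omega)
      by_cases hc : hrpInnerA ts sz ts.length (((ts.length : Int) - sz).toNat) 0 = true
      · rw [if_pos hc]
        rcases hinner.mp hc with ⟨j, h1, h2, h3⟩
        exact ⟨fun _ => ⟨sz, le_refl sz, hlt, j, h1, h2, h3⟩, fun _ => rfl⟩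
      · rw [if_neg hc, ih (sz + 1) (by omega)]
        constructor
        · rintro ⟨s, h1, h2, h3⟩; exact ⟨s, by omega, h2, h3⟩
        · rintro ⟨s, h1, h2, h3⟩
          refine ⟨s, ?_, h2, h3⟩
          rcases eq_or_lt_of_le h1 with heq | hlt2
          · exact absurd (hinner.mpr (heq ▸ h3)) hc
          · omega
    · rw [if_neg hlt]
      constructor
      · intro h; exact absurd h (by simp)
      · rintro ⟨s, h1, h2, _⟩; exfalso; omega

theorem pvJoin_append (sep : List Char) (xs ys : List (List Char)) (hx : xs ≠ []) (hy : ys ≠ []) :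
    PySem.Chars.join sep (xs ++ ys)
      = PySem.Chars.join sep xs ++ sep ++ PySem.Chars.join sep ys := by
  induction xs with
  | nil => exact absurd rfl hx
  | cons a xs ih =>
    cases xs with
    | nil =>
      cases ys with
      | nil => exact absurd rfl hy
      | cons b ys => simp [PySem.Chars.join_cons_cons, PySem.Chars.join_singleton]
    | cons a2 xs2 =>
      have := ih (by simp)
      simp only [List.cons_append, PySem.Chars.join_cons_cons] at *
      rw [this]
      simp

-- 'isIn' only depends on the character lists
theorem pvIsIn_congr (p a b : String) (h : a.toList = b.toList) :
    PySem.Str.isIn p a = PySem.Str.isIn p b := by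
  rw [Bool.eq_iff_iff, PySem.Str.isIn_iff_infix, PySem.Str.isIn_iff_infix, h]

-- join of the token suffix, on the character-list side
def pvRest (ts : List String) (m : Nat) : List Char :=
  PySem.Chars.join [' '] ((ts.map String.toList).drop m)

theorem pvRest_toList (ts : List String) (m : Int) (hm : 0 ≤ m) :
    (PySem.Str.join " " (PySem.List.slice ts (some m) none)).toList = pvRest ts m.toNat := by
  rw [PySem.List.slice_from ts hm, PySem.Str.toList_join]
  simp [pvRest, List.map_drop]

theorem pvRest_cons (ts : List String) (m : Nat) (hm : m + 1 < ts.length) :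
    pvRest ts m = (ts[m]'(by omega)).toList ++ [' '] ++ pvRest ts (m + 1) := by
  unfold pvRest
  have hmem : m < (ts.map String.toList).length := by simp; omega
  have hne : (ts.map String.toList).drop (m + 1) ≠ [] := by
    simp [List.drop_eq_nil_iff]; omega
  obtain ⟨y, t, h2⟩ := List.exists_cons_of_ne_nil hne
  rw [List.drop_eq_getElem_cons hmem, h2, PySem.Chars.join_cons_cons]
  simp

-- B's loop, characterized: with the remainder invariant, it finds exactly
-- '∃ j ∈ [0, i], cond(size, j)'
theorem pvLoopB_iff (ts : List String) (s : Int) (hs : 0 ≤ s) (fuel : Nat) :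
    ∀ (i : Int) (rest : String), i = (fuel : Int) - 1 → i + s ≤ (ts.length : Int) - 1 →
    (fuel = 0 ∨ rest.toList = pvRest ts (i + s).toNat) →
    (hrpLoopB ts s fuel i rest = true ↔
      ∃ j : Int, 0 ≤ j ∧ j ≤ i ∧ pvCond ts s j = true) := by
  induction fuel with
  | zero =>
    intro i rest hi _ _
    simp only [hrpLoopB]
    constructor
    · intro h; exact absurd h (by simp)
    · rintro ⟨j, h1, h2, _⟩; exfalso; omega
  | succ f ih =>
    intro i rest hi hlen hrest
    rcases hrest with h0 | hrest
    · exact absurd h0 (by simp)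
    have hi0 : 0 ≤ i := by omega
    rw [hrpLoopB]
    have hcond : PySem.Str.isIn
        (PySem.Str.join " " (PySem.List.slice ts (some i) (some (i + s)))) rest
        = pvCond ts s i := by
      unfold pvCond
      refine pvIsIn_congr _ _ _ ?_
      rw [pvRest_toList ts (i + s) (by omega)]
      exact hrest
    rw [hcond]
    by_cases hc : pvCond ts s i = true
    · rw [if_pos hc]
      exact ⟨fun _ => ⟨i, hi0, le_refl i, hc⟩, fun _ => rfl⟩
    · rw [if_neg hc]
      have hnext : f = 0 ∨
          (PySem.List.pyGetD ts (i + s - 1) "" ++ " " ++ rest).toList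
            = pvRest ts (i - 1 + s).toNat := by
        rcases Nat.eq_zero_or_pos f with hf | hf
        · exact Or.inl hf
        · right
          have hi1 : 1 ≤ i := by omega
          have hget : PySem.List.pyGetD ts (i + s - 1) ""
              = ts[(i + s - 1).toNat]'(by omega) :=
            PySem.List.pyGetD_eq_getElem ts "" (by omega) (by omega)
          have hkey := pvRest_cons ts (i + s - 1).toNat (by omega)
          have hkey2 : pvRest ts (i + s - 1).toNat
              = (ts[(i + s - 1).toNat]'(by omega)).toList ++ [' '] ++ pvRest ts (i + s).toNat := by
            rw [show (i + s).toNat = (i + s - 1).toNat + 1 from by omega]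
            exact hkey
          rw [show (i - 1 + s).toNat = (i + s - 1).toNat from by omega, hkey2,
              ← hrest, hget]
          simp
      rw [ih (i - 1) _ (by omega) (by omega) hnext]
      constructor
      · rintro ⟨j, h1, h2, h3⟩; exact ⟨j, h1, by omega, h3⟩
      · rintro ⟨j, h1, h2, h3⟩
        refine ⟨j, h1, ?_, h3⟩
        rcases eq_or_lt_of_le h2 with heq | hlt2
        · exact absurd (heq ▸ h3) hc
        · omega

-- an empty phrase (empty token slice) is always contained: cond holds
theorem pvCond_of_slice_nil (ts : List String) (s i : Int)
    (h : PySem.List.slice ts (some i) (some (i + s)) = []) : pvCond ts s i = true := by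
  unfold pvCond
  rw [PySem.Str.isIn_iff_infix, h]
  have hl : (PySem.Str.join " " ([] : List String)).toList = [] := by
    rw [PySem.Str.toList_join]
    simp [PySem.Chars.join_nil]
  rw [hl]
  exact List.nil_infix

-- MONOTONICITY: a repeating s-window gives a repeating (s-1)-window at the same spot
theorem pvCond_mono (ts : List String) (s i : Int) (hs : 1 ≤ s) (hi : 0 ≤ i)
    (hin : i < (ts.length : Int) - s) (h : pvCond ts s i = true) :
    pvCond ts (s - 1) i = true := by
  lift i to ℕ using hi with iN
  have hs0 : 0 ≤ s := by omega
  lift s to ℕ using hs0 with sN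
  have hsN : 1 ≤ sN := by exact_mod_cast hs
  have hlt : iN + sN < ts.length := by omega
  rcases Nat.lt_or_ge sN 2 with h1 | h2
  · -- sN = 1 : the (s-1)-phrase is the empty join
    have hsN1 : sN = 1 := by omega
    apply pvCond_of_slice_nil
    have : (iN : Int) + ((sN : Int) - 1) = ((iN : Nat) : Int) := by omega
    rw [this, PySem.List.slice_toNat ts (by positivity) (by positivity)]
    simp
  · -- sN ≥ 2 : prefix/suffix reasoning on the character lists
    unfold pvCond at h ⊢
    rw [PySem.Str.isIn_iff_infix] at h ⊢
    have hc1 : (iN : Int) + (sN : Int) = ((iN + sN : Nat) : Int) := by push_cast; ring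
    have hc2 : (iN : Int) + ((sN : Int) - 1) = ((iN + (sN - 1) : Nat) : Int) := by omega
    rw [hc1, PySem.List.slice_toNat ts (by positivity) (by positivity),
        PySem.List.slice_from ts (by positivity)] at h
    rw [hc2, PySem.List.slice_toNat ts (by positivity) (by positivity),
        PySem.List.slice_from ts (by positivity)]
    simp only [Int.toNat_natCast] at h ⊢
    rw [show iN + sN - iN = sN from by omega] at h
    rw [show iN + (sN - 1) - iN = sN - 1 from by omega]
    rw [PySem.Str.toList_join, PySem.Str.toList_join] at h
    rw [PySem.Str.toList_join, PySem.Str.toList_join]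
    rw [show ((" " : String).toList) = [' '] from by decide] at h ⊢
    rw [show (List.map String.toList ((ts.drop iN).take sN))
          = ((ts.map String.toList).drop iN).take sN from by simp [List.map_take, List.map_drop],
        show (List.map String.toList (ts.drop (iN + sN)))
          = (ts.map String.toList).drop (iN + sN) from by simp [List.map_drop]] at h
    rw [show (List.map String.toList ((ts.drop iN).take (sN - 1)))
          = ((ts.map String.toList).drop iN).take (sN - 1) from by simp [List.map_take, List.map_drop],
        show (List.map String.toList (ts.drop (iN + (sN - 1))))
          = (ts.map String.toList).drop (iN + (sN - 1)) from by simp [List.map_drop]]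
    have hLlen : (ts.map String.toList).length = ts.length := by simp
    obtain ⟨m, hm⟩ : ∃ m, iN + sN = m + 1 := ⟨iN + sN - 1, by omega⟩
    rw [hm] at h
    rw [show iN + (sN - 1) = m from by omega]
    have hmem : m < (ts.map String.toList).length := by omega
    -- split the sN-window as (sN-1)-window ++ last token
    have hsplitW : ((ts.map String.toList).drop iN).take sN
        = ((ts.map String.toList).drop iN).take (sN - 1)
          ++ [(ts.map String.toList)[m]'hmem] := by
      conv_lhs => rw [show sN = (sN - 1) + 1 from by omega]
      rw [List.take_add, List.drop_drop,
          show iN + (sN - 1) = m from by omega,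
          List.drop_eq_getElem_cons hmem]
      simp
    have hne1 : ((ts.map String.toList).drop iN).take (sN - 1) ≠ [] := by
      intro hnil
      have := congrArg List.length hnil
      simp [hLlen] at this
      omega
    have hsplitP : PySem.Chars.join [' '] (((ts.map String.toList).drop iN).take sN)
        = PySem.Chars.join [' '] (((ts.map String.toList).drop iN).take (sN - 1))
          ++ [' '] ++ (ts.map String.toList)[m]'hmem := by
      rw [hsplitW, pvJoin_append [' '] _ _ hne1 (by simp), PySem.Chars.join_singleton]
    -- the (sN-1)-rest is token ++ ' ' ++ sN-rest
    have hkey := pvRest_cons ts m (by omega)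
    unfold pvRest at hkey
    have hpre : PySem.Chars.join [' '] (((ts.map String.toList).drop iN).take (sN - 1))
        <+: PySem.Chars.join [' '] (((ts.map String.toList).drop iN).take sN) := by
      rw [hsplitP]
      exact ⟨[' '] ++ (ts.map String.toList)[m]'hmem, by simp⟩
    have hsuf : PySem.Chars.join [' '] ((ts.map String.toList).drop (m + 1))
        <:+ PySem.Chars.join [' '] ((ts.map String.toList).drop m) := by
      rw [hkey]
      exact ⟨(ts[m]'(by omega)).toList ++ [' '], by simp⟩
    exact (hpre.isInfix.trans h).trans hsuf.isInfix


-- descend from a repeating s-window to a repeating min_len-window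
theorem pvDescend (ts : List String) (mn : Int) (hmn : 0 ≤ mn) :
    ∀ (k : Nat) (s i : Int), s = mn + k → 0 ≤ i → i < (ts.length : Int) - s →
    pvCond ts s i = true →
    ∃ j : Int, 0 ≤ j ∧ j < (ts.length : Int) - mn ∧ pvCond ts mn j = true := by
  intro k
  induction k with
  | zero =>
    intro s i hs hi hin hc
    exact ⟨i, hi, by omega, by rw [show mn = s from by omega]; exact hc⟩
  | succ k ih =>
    intro s i hs hi hin hc
    have hmono := pvCond_mono ts s i (by omega) hi hin hc
    exact ih (s - 1) i (by omega) hi (by omega) hmono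

-- the initial remainder 'tokens[n-1]' is the join of the last-token suffix
theorem pvRest_last (ts : List String) (h : ts ≠ []) :
    (PySem.List.pyGetD ts ((ts.length : Int) - 1) "").toList
      = pvRest ts ((ts.length : Int) - 1).toNat := by
  have hn : 1 ≤ ts.length := List.length_pos_of_ne_nil h
  have hget : PySem.List.pyGetD ts ((ts.length : Int) - 1) ""
      = ts[((ts.length : Int) - 1).toNat]'(by omega) :=
    PySem.List.pyGetD_eq_getElem ts "" (by omega) (by omega)
  rw [hget]
  unfold pvRest
  have hmem : ts.length - 1 < (ts.map String.toList).length := by simp; omega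
  have hdrop : (ts.map String.toList).drop (((ts.length : Int) - 1).toNat)
      = [(ts.map String.toList)[ts.length - 1]'hmem] := by
    rw [show ((ts.length : Int) - 1).toNat = ts.length - 1 from by omega,
        List.drop_eq_getElem_cons hmem]
    congr 1
    rw [List.drop_eq_nil_iff]
    simp
    omega
  rw [hdrop, PySem.Chars.join_singleton]
  have e : ((ts.length : Int) - 1).toNat = ts.length - 1 := by omega
  simp [e]

-- the empty join is a substring of anything
theorem pvIsIn_nil (r : String) : PySem.Str.isIn (PySem.Str.join " " ([] : List String)) r = true := by
  rw [PySem.Str.isIn_iff_infix]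
  have hl : (PySem.Str.join " " ([] : List String)).toList = [] := by
    rw [PySem.Str.toList_join]
    simp [PySem.Chars.join_nil]
  rw [hl]
  exact List.nil_infix

-- the condition holds trivially when the phrase slice is empty (used for min_len < 0)
theorem pvSlice_nil_of_hi_le_lo (ts : List String) (a b : Int) (ha : 0 ≤ b) (hb : b ≤ a) :
    PySem.List.slice ts (some a) (some b) = [] := by
  rw [PySem.List.slice_toNat ts (by omega) ha]
  rw [List.take_eq_nil_iff]
  left
  omega

-- ===== VERDICT (by name: the statement is the Claim_ definition above) =====
theorem has_repeating_phrases_spec : Claim_equal_has_repeating_phrases := by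
  intro text mn mx _ hpre
  unfold Spec_has_repeating_phrases
  simp only [has_repeating_phrases, has_repeating_phrases_alt]
  set ts := PySem.Str.split₀ (PySem.Str.lower text) with hts
  by_cases h1 : mn > mx
  · rw [if_pos h1, show (mx + 1 - mn).toNat = 0 from by omega]
    rfl
  · rw [if_neg h1]
    by_cases h2 : (ts.length : Int) - mn ≤ 0
    · rw [if_pos h2, Bool.eq_false_iff]
      intro htrue
      rw [pvOuterA_iff ts (mx + 1) _ mn (Int.self_le_toNat _)] at htrue
      obtain ⟨s, hs1, _, j, hj0, hjlt, _⟩ := htrue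
      omega
    · rw [if_neg h2]
      by_cases h3 : mn < 0
      · -- min_len < 0 and tokens ≠ [] (from Pre_): both sides return true
        have hts_ne : ts ≠ [] := by
          rcases hpre with h | h | h
          · omega
          · omega
          · exact h
        have hn1 : 1 ≤ ts.length := List.length_pos_of_ne_nil hts_ne
        have hA : hrpOuterA ts (mx + 1) (mx + 1 - mn).toNat mn = true := by
          rw [pvOuterA_iff ts (mx + 1) _ mn (Int.self_le_toNat _)]
          refine ⟨mn, le_refl _, by omega, -mn, by omega, by omega, ?_⟩
          apply pvCond_of_slice_nil
          exact pvSlice_nil_of_hi_le_lo ts (-mn) (-mn + mn) (by omega) (by omega)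
        rw [hA]
        obtain ⟨k, hk⟩ : ∃ k, ((ts.length : Int) - mn).toNat = k + 1 :=
          ⟨((ts.length : Int) - mn).toNat - 1, by omega⟩
        rw [hk, hrpLoopB]
        have hnil : PySem.List.slice ts (some ((ts.length : Int) - mn - 1))
            (some ((ts.length : Int) - mn - 1 + mn)) = [] := by
          apply pvSlice_nil_of_hi_le_lo ts _ _ (by omega) (by omega)
        rw [hnil, if_pos (pvIsIn_nil _)]
      · -- 0 ≤ min_len ≤ max_len with at least one window: the two scans agree
        have hmn0 : 0 ≤ mn := by omega
        have hInv : ((ts.length : Int) - mn).toNat = 0 ∨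
            (PySem.List.pyGetD ts ((ts.length : Int) - 1) "").toList
              = pvRest ts ((ts.length : Int) - mn - 1 + mn).toNat := by
          right
          rw [show (ts.length : Int) - mn - 1 + mn = (ts.length : Int) - 1 from by ring]
          apply pvRest_last
          intro hnil
          rw [hnil] at h2
          simp at h2
          omega
        rw [Bool.eq_iff_iff,
          pvOuterA_iff ts (mx + 1) _ mn (Int.self_le_toNat _),
          pvLoopB_iff ts mn hmn0 ((ts.length : Int) - mn).toNat
            ((ts.length : Int) - mn - 1)
            (PySem.List.pyGetD ts ((ts.length : Int) - 1) "")
            (by omega) (by omega) hInv]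
        constructor
        · rintro ⟨s, hs1, _, j, hj0, hjlt, hc⟩
          obtain ⟨j', hj'0, hj'lt, hc'⟩ :=
            pvDescend ts mn hmn0 (s - mn).toNat s j (by omega) hj0 hjlt hc
          exact ⟨j', hj'0, by omega, hc'⟩
        · rintro ⟨j, hj0, hjle, hc⟩
          exact ⟨mn, le_refl _, by omega, j, hj0, by omega, hc⟩
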